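-- pv_equiv track=rewrite | github.com/BitBurrow/BitBurrow | libs/persistent_websocket/python/persistent_websocket.py | printable_hex
-- ===== SOURCE A (Python) =====
-- def printable_hex(chunk) -> str:
--     """Make binary data more readable for humans."""
--     out = list()
--     quote = list()  # quoted ascii text
--     for item in chunk:
--         if 32 <= item <= 126 and item != 39:  # printable character, but not single quote
--             quote.append(chr(item))
--         else:  # non-printable character
--             if quote:
--                 if len(quote) <= 3:  # isolated short strings remain as hex
--                     out.extend([f"{ord(e):02X} " for e in quote])
--                 else:
--                     out.append(f"'{''.join(quote)}' ")
--                 quote.clear()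
--             out.append(f"{item:02X} ")
--     if quote:
--         out.append(f"'{''.join(quote)}'")
--     return ''.join(out).strip()
-- ===== SOURCE B (Python) =====
-- def printable_hex(chunk) -> str:
--     """Make binary data more readable for humans."""
--     def is_text(b):
--         return 32 <= b <= 126 and b != 39
--     tokens = []
--     i, n = 0, len(chunk)
--     while i < n:
--         j = i
--         while j < n and is_text(chunk[j]) == is_text(chunk[i]):
--             j += 1
--         if is_text(chunk[i]) and (j - i > 3 or j == n):
--             tokens.append("'" + ''.join(chr(b) for b in chunk[i:j]) + "'")
--         else:
--             tokens.extend(f"{b:02X}" for b in chunk[i:j])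
--         i = j
--     return ' '.join(tokens)
-- ===== Notes on version B (the rewrite author's own statement) =====
-- stated objective: alternative
-- what changed: A scans byte-by-byte maintaining a pending-quote accumulator that is flushed at each non-printable byte and joins tokens that each carry a trailing space, stripping it at the end; B instead splits the input into maximal same-class runs with a two-level index loop, emits one token (or one hex token per byte) per run deciding quoting from the run's length and position directly, and joins the bare tokens with ' '.join, needing no strip.
import Mathlib
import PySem

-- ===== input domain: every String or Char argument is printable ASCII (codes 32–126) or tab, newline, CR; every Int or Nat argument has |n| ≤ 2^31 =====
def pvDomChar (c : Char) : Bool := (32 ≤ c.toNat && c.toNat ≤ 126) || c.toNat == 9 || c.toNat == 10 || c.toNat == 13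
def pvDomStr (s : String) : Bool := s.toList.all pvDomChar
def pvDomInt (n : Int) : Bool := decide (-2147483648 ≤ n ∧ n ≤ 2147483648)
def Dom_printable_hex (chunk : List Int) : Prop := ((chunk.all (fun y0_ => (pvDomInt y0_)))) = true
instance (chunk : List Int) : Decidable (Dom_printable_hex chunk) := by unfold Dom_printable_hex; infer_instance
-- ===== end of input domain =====

-- B rewrites A's byte-at-a-time accumulator-with-pending-quote as a run-splitting loop whose
-- tokens are joined by ' '.join (no strip needed); equivalence of the returned strings is proved
-- for ALL integer lists (the proof does not even need Dom).

-- shared primitive: Python's f"{n:02X}" (hex digits of |n|, '-' in front for negatives,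
-- zero-padded to width 2 with the sign kept in front — exactly str.zfill's rule)
def pvHexDigit (n : Nat) : Char :=
  ['0','1','2','3','4','5','6','7','8','9','A','B','C','D','E','F'].getD n '0'

def pvHexChars (n : Nat) : List Char :=
  if n < 16 then [pvHexDigit n]
  else pvHexChars (n / 16) ++ [pvHexDigit (n % 16)]
  decreasing_by exact Nat.div_lt_self (by omega) (by omega)

def pvFmt02X (n : Int) : List Char :=
  PySem.Chars.zfill (if n < 0 then '-' :: pvHexChars n.natAbs else pvHexChars n.natAbs) 2

-- ===== PORT A =====
-- A's loop state: (out as a list of tokens, quote as a list of chars); strings are List Char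
-- throughout, ''.join(out) is List.flatten, .strip() is PySem.Chars.strip.
def pvAStep (s : List (List Char) × List Char) (item : Int) : List (List Char) × List Char :=
  if 32 ≤ item ∧ item ≤ 126 ∧ item ≠ 39 then
    (s.1, s.2 ++ [Char.ofNat item.toNat])
  else
    let out := if s.2 ≠ [] then
        (if s.2.length ≤ 3 then s.1 ++ s.2.map (fun e => pvFmt02X (e.toNat : Int) ++ [' '])
         else s.1 ++ [('\'' :: s.2 ++ ['\'']) ++ [' ']])
      else s.1
    (out ++ [pvFmt02X item ++ [' ']], [])

def printable_hex (chunk : List Int) : String :=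
  let s := chunk.foldl pvAStep ([], [])
  let out := if s.2 ≠ [] then s.1 ++ ['\'' :: s.2 ++ ['\'']] else s.1
  String.mk (PySem.Chars.strip out.flatten)

-- ===== PORT B =====
def pvIsText (b : Int) : Bool := decide (32 ≤ b ∧ b ≤ 126 ∧ b ≠ 39)

-- Source B's outer while loop: each step takes the maximal run of bytes of the same class
-- (the inner 'while j < n' scan = takeWhile/dropWhile) and emits its token(s).
def pvBTokens : List Int → List (List Char)
  | [] => []
  | b :: bs =>
    let run := b :: bs.takeWhile (fun x => pvIsText x == pvIsText b)
    let rest := bs.dropWhile (fun x => pvIsText x == pvIsText b)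
    (if pvIsText b && (decide (3 < run.length) || rest.isEmpty)
     then [('\'' :: run.map (fun x => Char.ofNat x.toNat)) ++ ['\'']]
     else run.map pvFmt02X) ++ pvBTokens rest
  termination_by l => l.length
  decreasing_by
    exact Nat.lt_succ_of_le (List.length_dropWhile_le _ _)

def printable_hex_alt (chunk : List Int) : String :=
  String.mk (PySem.Chars.join [' '] (pvBTokens chunk))

-- ===== PRECONDITION & SPEC =====
def Spec_printable_hex (chunk : List Int) (out : String) : Prop := out = printable_hex_alt chunk
instance (chunk : List Int) (out : String) : Decidable (Spec_printable_hex chunk out) := by unfold Spec_printable_hex; infer_instance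

-- ===== CLAIM (what is proved, stated in full; the proofs are below) =====
def Claim_equal_printable_hex : Prop := ∀ (chunk : List Int), Dom_printable_hex chunk → Spec_printable_hex chunk (printable_hex chunk)

-- ===== LEMMAS AND PROOFS =====

-- the trailing piece A's flattened output has beyond B's ' '-join: one space unless the data
-- ends in a printable run (or is empty)
def pvTrail : List Int → List Char
  | [] => []
  | [b] => if pvIsText b then [] else [' ']
  | _ :: b :: bs => pvTrail (b :: bs)

-- A's finish step (flush the pending quote, ''.join)
def pvAFin (s : List (List Char) × List Char) : List Char :=
  (if s.2 ≠ [] then s.1 ++ ['\'' :: s.2 ++ ['\'']] else s.1).flatten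

lemma pvMapSp {α : Type} (f : α → List Char) (l : List α) :
    l.map (fun x => f x ++ [' ']) = (l.map f).map (fun t => t ++ [' ']) := by
  rw [List.map_map]; rfl

lemma pvJoin_singleton (t : List Char) : PySem.Chars.join [' '] [t] = t := by
  simp [PySem.Chars.join, List.intercalate, List.intersperse]

lemma pvJoin_cons (t : List Char) (ts : List (List Char)) (h : ts ≠ []) :
    PySem.Chars.join [' '] (t :: ts) = t ++ [' '] ++ PySem.Chars.join [' '] ts := by
  cases ts with
  | nil => simp at h
  | cons t' ts' => simp [PySem.Chars.join, List.intercalate, List.intersperse]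

lemma pvJoin_append (xs ys : List (List Char)) (hx : xs ≠ []) (hy : ys ≠ []) :
    PySem.Chars.join [' '] (xs ++ ys) =
      PySem.Chars.join [' '] xs ++ [' '] ++ PySem.Chars.join [' '] ys := by
  induction xs with
  | nil => simp at hx
  | cons a xs ih =>
    cases xs with
    | nil =>
      rw [List.cons_append, List.nil_append, pvJoin_cons a ys hy, pvJoin_singleton]
    | cons a' xs' =>
      rw [List.cons_append, pvJoin_cons a (a' :: xs' ++ ys) (by simp),
        pvJoin_cons a (a' :: xs') (by simp), ih (by simp)]
      simp [List.append_assoc]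

lemma pvFlatten_map_space (toks : List (List Char)) (h : toks ≠ []) :
    (toks.map (· ++ [' '])).flatten = PySem.Chars.join [' '] toks ++ [' '] := by
  induction toks with
  | nil => simp at h
  | cons t ts ih =>
    cases ts with
    | nil => simp [PySem.Chars.join, List.intercalate, List.intersperse]
    | cons t' ts' =>
      have h2 := ih (by simp)
      simp only [List.map_cons, List.flatten_cons] at h2 ⊢
      rw [h2, pvJoin_cons t (t' :: ts') (by simp)]
      simp [List.append_assoc]

lemma pvBTokens_ne_nil (b : Int) (bs : List Int) : pvBTokens (b :: bs) ≠ [] := by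
  unfold pvBTokens
  dsimp only
  split <;> simp

-- (1) a fully non-printable run is absorbed into out, one hex token (with its space) per byte
lemma pvAFold_nontext (run rest : List Int) (out : List (List Char))
    (h : ∀ x ∈ run, pvIsText x = false) :
    List.foldl pvAStep (out, []) (run ++ rest) =
      List.foldl pvAStep (out ++ run.map (fun x => pvFmt02X x ++ [' ']), []) rest := by
  induction run generalizing out with
  | nil => simp
  | cons c cs ih =>
    have hc : pvIsText c = false := h c (by simp)
    have hcs : ∀ x ∈ cs, pvIsText x = false := fun x hx => h x (by simp [hx])
    simp only [List.cons_append, List.foldl_cons]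
    have hstep : pvAStep (out, []) c = (out ++ [pvFmt02X c ++ [' ']], []) := by
      simp only [pvIsText, decide_eq_false_iff_not] at hc
      simp [pvAStep, hc]
    rw [hstep, ih _ hcs]
    simp

-- (2) a fully printable run is appended to the pending quote
lemma pvAFold_text (run rest : List Int) (out : List (List Char)) (q : List Char)
    (h : ∀ x ∈ run, pvIsText x = true) :
    List.foldl pvAStep (out, q) (run ++ rest) =
      List.foldl pvAStep (out, q ++ run.map (fun x => Char.ofNat x.toNat)) rest := by
  induction run generalizing q with
  | nil => simp
  | cons c cs ih =>
    have hc : pvIsText c = true := h c (by simp)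
    have hcs : ∀ x ∈ cs, pvIsText x = true := fun x hx => h x (by simp [hx])
    simp only [List.cons_append, List.foldl_cons]
    have hstep : pvAStep (out, q) c = (out, q ++ [Char.ofNat c.toNat]) := by
      simp only [pvIsText, decide_eq_true_eq] at hc
      simp [pvAStep, hc]
    rw [hstep, ih _ hcs]
    simp

-- flushing the quote before a non-printable byte equals pre-flushing it into out
lemma pvAStep_flush (out : List (List Char)) (q : List Char) (c : Int)
    (hq : q ≠ []) (hc : pvIsText c = false) :
    pvAStep (out, q) c =
      pvAStep (out ++ (if q.length ≤ 3 then q.map (fun e => pvFmt02X (e.toNat : Int) ++ [' '])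
                       else [('\'' :: q ++ ['\'']) ++ [' ']]), []) c := by
  simp only [pvIsText, decide_eq_false_iff_not] at hc
  by_cases h3 : q.length ≤ 3 <;>
    simp [pvAStep, hc, hq, h3, List.append_assoc]

-- chr then ord round-trips on printable bytes
lemma pvChr_toNat (x : Int) (h1 : 32 ≤ x) (h2 : x ≤ 126) :
    ((Char.ofNat x.toNat).toNat : Int) = x := by
  have hv : Nat.isValidChar x.toNat := Or.inl (by omega)
  simp [Char.ofNat, hv, Char.ofNatAux]
  omega

lemma pvTrail_append (xs ys : List Int) (hy : ys ≠ []) :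
    pvTrail (xs ++ ys) = pvTrail ys := by
  induction xs with
  | nil => rfl
  | cons x xs ih =>
    cases hxs : xs ++ ys with
    | nil => simp only [List.append_eq_nil_iff] at hxs; exact absurd hxs.2 hy
    | cons z zs => simp only [List.cons_append, hxs, pvTrail]; rw [← hxs, ih]

lemma pvTrail_last (xs : List Int) (hx : xs ≠ []) :
    pvTrail xs = if pvIsText (xs.getLast hx) then [] else [' '] := by
  induction xs with
  | nil => simp at hx
  | cons x xs ih =>
    cases xs with
    | nil => rfl
    | cons y ys => rw [List.getLast_cons (by simp)]; exact ih (by simp)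

-- MAIN INVARIANT: A's flushed-and-joined output = out's content ++ B's ' '-joined tokens ++ trail
lemma pvMain (chunk : List Int) (out : List (List Char)) :
    pvAFin (List.foldl pvAStep (out, []) chunk) =
      out.flatten ++ PySem.Chars.join [' '] (pvBTokens chunk) ++ pvTrail chunk := by
  induction chunk using pvBTokens.induct generalizing out with
  | case1 => simp [pvAFin, pvBTokens, pvTrail, PySem.Chars.join, List.intercalate]
  | case2 b bs rest ih =>
    have hrest_def : rest = bs.dropWhile (fun x => pvIsText x == pvIsText b) := rfl
    clear_value rest
    set run : List Int := b :: bs.takeWhile (fun x => pvIsText x == pvIsText b) with hrun_def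
    have hsplit : b :: bs = run ++ rest := by
      rw [hrun_def, hrest_def]
      simp only [List.cons_append, List.takeWhile_append_dropWhile]
    have hrun_ne : run ≠ [] := by simp [hrun_def]
    have hrun_cls : ∀ x ∈ run, pvIsText x = pvIsText b := by
      intro x hx
      rcases List.mem_cons.1 hx with h | h
      · rw [h]
      · have h2 := List.mem_takeWhile_imp (p := fun y => pvIsText y == pvIsText b) h
        exact beq_iff_eq.1 (by simpa using h2)
    have hrest_hd : ∀ c cs, rest = c :: cs → pvIsText c ≠ pvIsText b := by
      intro c cs hr
      have h2 := List.head?_dropWhile_not (fun x => pvIsText x == pvIsText b) bs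
      rw [show bs.dropWhile (fun x => pvIsText x == pvIsText b) = c :: cs from hrest_def ▸ hr] at h2
      simpa using h2
    have htok : pvBTokens (b :: bs) =
        (if pvIsText b && (decide (3 < run.length) || rest.isEmpty)
         then [('\'' :: run.map (fun x => Char.ofNat x.toNat)) ++ ['\'']]
         else run.map pvFmt02X) ++ pvBTokens rest := by
      conv_lhs => unfold pvBTokens
      rw [← hrest_def]
    have htrail : pvTrail (b :: bs) = if rest.isEmpty then pvTrail run else pvTrail rest := by
      rw [hsplit]
      cases rest with
      | nil => simp
      | cons c cs => simp [pvTrail_append run (c :: cs) (by simp)]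
    have hmapsp : run.map (fun x => pvFmt02X x ++ [' ']) =
        (run.map pvFmt02X).map (fun t => t ++ [' ']) := pvMapSp pvFmt02X run
    cases hb : pvIsText b with
    | false =>
      -- non-printable run: A emits one hex+space token per byte
      have hall : ∀ x ∈ run, pvIsText x = false := fun x hx => (hrun_cls x hx).trans hb
      have hfold : List.foldl pvAStep (out, []) (b :: bs) =
          List.foldl pvAStep (out ++ run.map (fun x => pvFmt02X x ++ [' ']), []) rest := by
        rw [show List.foldl pvAStep (out, []) (b :: bs)
              = List.foldl pvAStep (out, []) (run ++ rest) from by rw [← hsplit]]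
        exact pvAFold_nontext run rest out hall
      cases hrest : rest with
      | nil =>
        subst hrest
        have hlast : pvTrail run = [' '] := by
          rw [pvTrail_last run hrun_ne, if_neg]
          simp [hall _ (List.getLast_mem hrun_ne)]
        rw [hfold, ih, htok, htrail]
        rw [hmapsp, List.flatten_append,
          pvFlatten_map_space (run.map pvFmt02X) (by simp [hrun_ne])]
        simp [hb, hlast, pvBTokens, pvTrail, List.append_assoc]
      | cons c cs =>
        subst hrest
        have hbne : pvBTokens (c :: cs) ≠ [] := pvBTokens_ne_nil c cs
        rw [hfold, ih, htok, htrail]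
        simp only [hb, Bool.false_and, Bool.false_eq_true, if_false, List.isEmpty_cons]
        rw [pvJoin_append (run.map pvFmt02X) (pvBTokens (c :: cs)) (by simp [hrun_ne]) hbne]
        rw [hmapsp, List.flatten_append,
          pvFlatten_map_space (run.map pvFmt02X) (by simp [hrun_ne])]
        simp [List.append_assoc]
    | true =>
      -- printable run: A accumulates it into quote
      have hall : ∀ x ∈ run, pvIsText x = true := fun x hx => (hrun_cls x hx).trans hb
      have hq : run.map (fun x => Char.ofNat x.toNat) ≠ [] := by simp [hrun_ne]
      have hfold : List.foldl pvAStep (out, []) (b :: bs) =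
          List.foldl pvAStep (out, run.map (fun x => Char.ofNat x.toNat)) rest := by
        rw [show List.foldl pvAStep (out, []) (b :: bs)
              = List.foldl pvAStep (out, []) (run ++ rest) from by rw [← hsplit]]
        have h2 := pvAFold_text run rest out [] hall
        simpa using h2
      cases hrest : rest with
      | nil =>
        subst hrest
        -- final printable run: always quoted
        have hlast : pvTrail run = [] := by
          rw [pvTrail_last run hrun_ne, if_pos]
          exact hall _ (List.getLast_mem hrun_ne)
        rw [hfold, htok, htrail]
        simp [hb, hlast, pvAFin, hq, pvBTokens]
      | cons c cs =>
        -- interior printable run, flushed at the first byte of the following non-printable run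
        have hc : pvIsText c = false := by
          have h2 := hrest_hd c cs hrest
          cases hcv : pvIsText c with
          | false => rfl
          | true => rw [hb] at h2; exact absurd hcv h2
        subst hrest
        set q := run.map (fun x => Char.ofNat x.toNat) with hqdef
        set F := (if q.length ≤ 3 then q.map (fun e => pvFmt02X (e.toNat : Int) ++ [' '])
                  else [('\'' :: q ++ ['\'']) ++ [' ']]) with hFdef
        have hfold2 : List.foldl pvAStep (out, q) (c :: cs) =
            List.foldl pvAStep (out ++ F, []) (c :: cs) := by
          simp only [List.foldl_cons]
          rw [pvAStep_flush out q c (by rw [hqdef]; exact hq) hc]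
        have hFflat : F.flatten =
            PySem.Chars.join [' ']
              (if pvIsText b && (decide (3 < run.length) || (c :: cs).isEmpty)
               then [('\'' :: run.map (fun x => Char.ofNat x.toNat)) ++ ['\'']]
               else run.map pvFmt02X) ++ [' '] := by
          simp only [hb, List.isEmpty_cons, Bool.or_false, Bool.true_and]
          cases hlen : decide (3 < run.length) with
          | true =>
            have h3 : ¬ q.length ≤ 3 := by simp [hqdef] at hlen ⊢; omega
            rw [hFdef, if_neg h3]
            simp [hqdef]
          | false =>
            have h3 : q.length ≤ 3 := by simp [hqdef] at hlen ⊢; omega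
            have hqmap : q.map (fun e => pvFmt02X (e.toNat : Int)) = run.map pvFmt02X := by
              rw [hqdef, List.map_map]
              apply List.map_congr_left
              intro x hx
              have hx2 := hall x hx
              simp only [pvIsText, decide_eq_true_eq] at hx2
              simp only [Function.comp]
              rw [pvChr_toNat x hx2.1 hx2.2.1]
            rw [hFdef, if_pos h3, pvMapSp (fun e => pvFmt02X (e.toNat : Int)) q, hqmap,
              pvFlatten_map_space _ (by simp [hrun_ne])]
            simp only [Bool.false_eq_true, if_false]
        have hbne : pvBTokens (c :: cs) ≠ [] := pvBTokens_ne_nil c cs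
        rw [hfold, hfold2, ih, htok, htrail]
        rw [pvJoin_append _ (pvBTokens (c :: cs)) (by split <;> simp [hrun_ne]) hbne]
        rw [List.flatten_append, hFflat]
        simp [hqdef, List.append_assoc]

-- === strip lemmas: the joined tokens start and end with non-space characters ===

lemma pvHexDigit_nonspace (n : Nat) : PySem.Chars.isspace (pvHexDigit n) = false := by
  unfold pvHexDigit
  rcases lt_or_ge n 16 with h | h
  · interval_cases n <;> decide
  · rw [List.getD_eq_default _ _ (by simpa using h)]; decide

lemma pvHexChars_nonspace (n : Nat) : ∀ c ∈ pvHexChars n, PySem.Chars.isspace c = false := by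
  induction n using pvHexChars.induct with
  | case1 n h => intro c hc; rw [pvHexChars, if_pos h] at hc; simp at hc; rw [hc]; exact pvHexDigit_nonspace n
  | case2 n h ih =>
    intro c hc
    rw [pvHexChars, if_neg h] at hc
    rcases List.mem_append.1 hc with h' | h'
    · exact ih c h'
    · simp at h'; rw [h']; exact pvHexDigit_nonspace _

lemma pvZfill_sub (cs : List Char) (w : Int) :
    ∀ c ∈ PySem.Chars.zfill cs w, c = '0' ∨ c ∈ cs := by
  intro c hc
  unfold PySem.Chars.zfill at hc
  split at hc
  · exact Or.inr hc
  · split at hc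
    · split at hc
      · rcases List.mem_cons.1 hc with h | h
        · simp [h, List.mem_cons]
        · rcases List.mem_append.1 h with h' | h'
          · exact Or.inl (List.eq_of_mem_replicate h')
          · simp [h', List.mem_cons]
      · rcases List.mem_append.1 hc with h' | h'
        · exact Or.inl (List.eq_of_mem_replicate h')
        · exact Or.inr h'
    · exact Or.inl (List.eq_of_mem_replicate hc)

lemma pvHexChars_ne_nil (n : Nat) : pvHexChars n ≠ [] := by
  unfold pvHexChars
  split <;> simp

lemma pvFmt_ne_nil (n : Int) : pvFmt02X n ≠ [] := by
  have h1 : ∀ cs : List Char, cs ≠ [] → PySem.Chars.zfill cs 2 ≠ [] := by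
    intro cs hcs
    unfold PySem.Chars.zfill
    split
    · exact hcs
    · cases cs with
      | nil => decide
      | cons c rest => split <;> first | (split <;> simp) | decide
  unfold pvFmt02X
  apply h1
  split
  · simp
  · exact pvHexChars_ne_nil _

lemma pvFmt_nonspace (n : Int) : ∀ c ∈ pvFmt02X n, PySem.Chars.isspace c = false := by
  intro c hc
  rcases pvZfill_sub _ _ c hc with h | h
  · rw [h]; decide
  · split at h
    · rcases List.mem_cons.1 h with h' | h'
      · rw [h']; decide
      · exact pvHexChars_nonspace _ c h'
    · exact pvHexChars_nonspace _ c h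

-- every token B emits is nonempty with non-space characters at both ends
lemma pvTok_ends (chunk : List Int) :
    ∀ t ∈ pvBTokens chunk, t ≠ [] ∧
      (∀ a, t.head? = some a → PySem.Chars.isspace a = false) ∧
      (∀ a, t.getLast? = some a → PySem.Chars.isspace a = false) := by
  induction chunk using pvBTokens.induct with
  | case1 => intro t ht; simp [pvBTokens] at ht
  | case2 b bs rest ih =>
    intro t ht
    unfold pvBTokens at ht
    dsimp only at ht
    rcases List.mem_append.1 ht with h | h
    · split at h
      · simp only [List.mem_singleton] at h
        subst h
        refine ⟨by simp, ?_, ?_⟩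
        · intro a ha; simp at ha; rw [← ha]; decide
        · intro a ha
          rw [show ('\'' :: List.map (fun x => Char.ofNat x.toNat)
                (b :: List.takeWhile (fun x => pvIsText x == pvIsText b) bs) ++ ['\''])
              = ('\'' :: List.map (fun x => Char.ofNat x.toNat)
                (b :: List.takeWhile (fun x => pvIsText x == pvIsText b) bs)) ++ ['\''] from rfl,
            List.getLast?_concat] at ha
          simp at ha; rw [← ha]; decide
      · rcases List.mem_map.1 h with ⟨x, _, rfl⟩
        have hne : pvFmt02X x ≠ [] := pvFmt_ne_nil x
        refine ⟨hne, ?_, ?_⟩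
        · intro a ha
          exact pvFmt_nonspace x a (by
            cases hF : pvFmt02X x with
            | nil => exact absurd hF hne
            | cons y ys =>
              rw [hF, List.head?_cons] at ha
              rw [← Option.some_inj.mp ha]
              exact List.mem_cons_self)
        · intro a ha
          exact pvFmt_nonspace x a (List.mem_of_getLast? ha)
    · exact ih t h

lemma pvDropWhile_nonspace_head (a : Char) (l : List Char)
    (h : PySem.Chars.isspace a = false) :
    List.dropWhile PySem.Chars.isspace (a :: l) = a :: l := by
  simp [h]

lemma pvRstrip_append_space (x : List Char) :
    PySem.Chars.rstrip (x ++ [' ']) = PySem.Chars.rstrip x := by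
  unfold PySem.Chars.rstrip
  rw [List.reverse_append]
  simp [show PySem.Chars.isspace ' ' = true from rfl]

lemma pvRstrip_of_last (x : List Char)
    (h : ∀ a, x.getLast? = some a → PySem.Chars.isspace a = false) (hx : x ≠ []) :
    PySem.Chars.rstrip x = x := by
  unfold PySem.Chars.rstrip
  cases hrev : x.reverse with
  | nil => simp_all
  | cons a l =>
    have hha : x.getLast? = some a := by
      rw [List.getLast?_eq_head?_reverse, hrev]; rfl
    rw [pvDropWhile_nonspace_head a l (h a hha), ← hrev, List.reverse_reverse]

lemma pvLstrip_of_head (x : List Char)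
    (h : ∀ a, x.head? = some a → PySem.Chars.isspace a = false) :
    PySem.Chars.lstrip x = x := by
  unfold PySem.Chars.lstrip
  cases x with
  | nil => rfl
  | cons a l => exact pvDropWhile_nonspace_head a l (h a rfl)

-- head? and getLast? of the ' '-join are those of the first / last token
lemma pvJoin_head? (t : List Char) (ts : List (List Char)) (ht : t ≠ []) :
    (PySem.Chars.join [' '] (t :: ts)).head? = t.head? := by
  cases ts with
  | nil => rw [pvJoin_singleton]
  | cons t' ts' =>
    rw [pvJoin_cons t (t' :: ts') (by simp)]
    cases t with
    | nil => simp at ht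
    | cons a l => simp

lemma pvJoin_getLast? (ts : List (List Char)) (t : List Char) (ht : t ≠ []) :
    (PySem.Chars.join [' '] (ts ++ [t])).getLast? = t.getLast? := by
  cases ts with
  | nil => rw [List.nil_append, pvJoin_singleton]
  | cons t' ts' =>
    rw [pvJoin_append (t' :: ts') [t] (by simp) (by simp), pvJoin_singleton]
    exact List.getLast?_append_of_ne_nil _ ht

theorem pv_eq (chunk : List Int) : printable_hex chunk = printable_hex_alt chunk := by
  have hmain := pvMain chunk []
  have hA : printable_hex chunk =
      String.mk (PySem.Chars.strip (pvAFin (chunk.foldl pvAStep ([], [])))) := rfl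
  rw [hA, hmain]
  simp only [List.flatten_nil, List.nil_append]
  unfold printable_hex_alt
  congr 1
  -- strip (join ++ trail) = join
  have hends := pvTok_ends chunk
  cases htoks : pvBTokens chunk with
  | nil =>
    cases chunk with
    | nil => rfl
    | cons c cs => exact absurd htoks (pvBTokens_ne_nil c cs)
  | cons t ts =>
    rw [← htoks]
    have hjoin_ne : PySem.Chars.join [' '] (pvBTokens chunk) ≠ [] := by
      rw [htoks]
      have ht := hends t (by rw [htoks]; simp)
      cases ts with
      | nil => rw [pvJoin_singleton]; exact ht.1
      | cons t' ts' =>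
        rw [pvJoin_cons t (t' :: ts') (by simp)]
        simp
    have hhead : ∀ a, (PySem.Chars.join [' '] (pvBTokens chunk)).head? = some a →
        PySem.Chars.isspace a = false := by
      intro a ha
      rw [htoks, pvJoin_head? t ts (hends t (by rw [htoks]; simp)).1] at ha
      exact (hends t (by rw [htoks]; simp)).2.1 a ha
    have hlast : ∀ a, (PySem.Chars.join [' '] (pvBTokens chunk)).getLast? = some a →
        PySem.Chars.isspace a = false := by
      intro a ha
      rcases List.eq_nil_or_concat (pvBTokens chunk) with h | ⟨ts', tl, h⟩
      · rw [htoks] at h; simp at h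
      · rw [List.concat_eq_append] at h
        have htl := hends tl (by rw [h]; simp)
        rw [h, pvJoin_getLast? ts' tl htl.1] at ha
        exact htl.2.2 a ha
    -- trail is [] or [' ']
    have htr : pvTrail chunk = [] ∨ pvTrail chunk = [' '] := by
      cases chunk with
      | nil => exact Or.inl rfl
      | cons c cs =>
        rw [pvTrail_last (c :: cs) (by simp)]
        split
        · exact Or.inl rfl
        · exact Or.inr rfl
    unfold PySem.Chars.strip
    rcases htr with h | h
    · rw [h, List.append_nil, pvLstrip_of_head _ hhead, pvRstrip_of_last _ hlast hjoin_ne]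
    · rw [h]
      have hl : PySem.Chars.lstrip (PySem.Chars.join [' '] (pvBTokens chunk) ++ [' ']) =
          PySem.Chars.join [' '] (pvBTokens chunk) ++ [' '] := by
        apply pvLstrip_of_head
        intro a ha
        apply hhead a
        rw [List.head?_append_of_ne_nil _ hjoin_ne] at ha
        exact ha
      rw [hl, pvRstrip_append_space, pvRstrip_of_last _ hlast hjoin_ne]

-- ===== VERDICT (by name: the statement is the Claim_ definition above) =====
theorem printable_hex_spec : Claim_equal_printable_hex := by
  intro chunk _
  unfold Spec_printable_hex
  exact pv_eq chunk
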